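-- pv_equiv track=rewrite | github.com/erosika/hermes-agent | hermes_cli/skin.py | _render_mask_row
-- ===== SOURCE A (Python) =====
-- def _render_mask_row(row: str, color: str, char: str = "█") -> str:
--     out: list[str] = []
--     active = False
--     for pixel in row:
--         if pixel == ".":
--             if active:
--                 out.append("[/]")
--                 active = False
--             out.append(" ")
--             continue
--         if not active:
--             out.append(f"[{color}]")
--             active = True
--         out.append(char)
--     if active:
--         out.append("[/]")
--     return "".join(out)
-- ===== SOURCE B (Python) =====
-- def _render_mask_row(row: str, color: str, char: str = "\u2588") -> str:
--     # run-oriented: scan maximal runs of dots / non-dots, one segment per run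
--     parts: list[str] = []
--     i, n = 0, len(row)
--     while i < n:
--         is_dot = row[i] == "."
--         j = i + 1
--         while j < n and (row[j] == ".") == is_dot:
--             j += 1
--         run = j - i
--         parts.append(" " * run if is_dot else f"[{color}]" + char * run + "[/]")
--         i = j
--     return "".join(parts)
-- ===== Notes on version B (the rewrite author's own statement) =====
-- stated objective: alternative
-- what changed: B scans the row as maximal runs of dots/non-dots and emits one segment (spaces, or one color-wrapped block of repeated chars) per run, instead of A's per-pixel loop with a stateful open/close 'active' flag.
import Mathlib
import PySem

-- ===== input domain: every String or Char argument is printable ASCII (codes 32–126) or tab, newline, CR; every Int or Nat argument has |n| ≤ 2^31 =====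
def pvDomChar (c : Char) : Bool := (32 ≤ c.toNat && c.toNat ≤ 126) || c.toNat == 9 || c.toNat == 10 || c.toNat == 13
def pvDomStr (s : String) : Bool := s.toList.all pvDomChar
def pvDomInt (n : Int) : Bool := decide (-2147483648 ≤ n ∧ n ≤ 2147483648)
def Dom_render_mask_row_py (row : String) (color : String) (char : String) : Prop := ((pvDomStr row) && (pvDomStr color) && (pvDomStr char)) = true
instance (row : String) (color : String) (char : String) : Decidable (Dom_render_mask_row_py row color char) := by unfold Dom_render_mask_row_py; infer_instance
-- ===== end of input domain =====

-- B renders the row run by run (one segment per maximal run) instead of A's per-pixel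
-- loop with an open/close 'active' flag; alternative decomposition, same cost.

-- ===== PORT A =====
-- for pixel in row: dot → maybe close markup then a space; else maybe open markup then char; close at end
def aLoop (color : String) (char : String) : List Char → List String × Bool → List String × Bool
  | [], st => st
  | p :: rest, (out, active) =>
    if p = '.' then
      aLoop color char rest ((if active then out ++ ["[/]"] else out) ++ [" "], false)
    else
      aLoop color char rest ((if active then out else out ++ ["[" ++ color ++ "]"]) ++ [char], true)

def render_mask_row_py (row : String) (color : String) (char : String) : String :=
  let r := aLoop color char row.toList ([], false)
  String.join (if r.2 then r.1 ++ ["[/]"] else r.1)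

-- ===== PORT B =====
-- ' ' * n / char * n
def joinRep (n : Nat) (s : String) : String := String.join (List.replicate n s)

-- inner while loop of Source B: length of the leading run matching flag d, and the remainder
def bTake (d : Bool) : List Char → Nat × List Char
  | [] => (0, [])
  | c :: cs => if (decide (c = '.')) = d then
      let r := bTake d cs
      (r.1 + 1, r.2)
    else (0, c :: cs)

theorem bTake_len (d : Bool) (cs : List Char) : (bTake d cs).2.length ≤ cs.length := by
  induction cs with
  | nil => simp [bTake]
  | cons c cs ih => simp only [bTake]; split <;> simp <;> omega

-- outer while loop of Source B: one segment per maximal run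
def bLoop (color : String) (char : String) : List Char → List String
  | [] => []
  | c :: cs =>
    let d := decide (c = '.')
    let r := bTake d cs
    (if d then joinRep (r.1 + 1) " "
     else "[" ++ color ++ "]" ++ joinRep (r.1 + 1) char ++ "[/]") :: bLoop color char r.2
termination_by cs => cs.length
decreasing_by
  simpa using Nat.lt_succ_of_le (bTake_len _ _)

def render_mask_row_py_alt (row : String) (color : String) (char : String) : String :=
  String.join (bLoop color char row.toList)

-- ===== PRECONDITION & SPEC =====
def Spec_render_mask_row_py (row : String) (color : String) (char : String) (out : String) : Prop := out = render_mask_row_py_alt row color char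
instance (row : String) (color : String) (char : String) (out : String) : Decidable (Spec_render_mask_row_py row color char out) := by unfold Spec_render_mask_row_py; infer_instance

-- ===== CLAIM (what is proved, stated in full; the proofs are below) =====
def Claim_equal_render_mask_row_py : Prop := ∀ (row : String) (color : String) (char : String), Dom_render_mask_row_py row color char → Spec_render_mask_row_py row color char (render_mask_row_py row color char)

-- ===== LEMMAS AND PROOFS =====

-- functional reading of A's loop: the markup emitted for the rest, given the active flag
def fA (color : String) (char : String) : List Char → Bool → String
  | [], active => if active then "[/]" else ""
  | p :: rest, active =>
    if p = '.' then (if active then "[/]" else "") ++ " " ++ fA color char rest false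
    else (if active then "" else "[" ++ color ++ "]") ++ char ++ fA color char rest true

@[simp] theorem join_nil : String.join [] = "" := rfl

@[simp] theorem join_cons (x : String) (xs : List String) :
    String.join (x :: xs) = x ++ String.join xs := by
  simp [String.join]
  induction xs generalizing x with
  | nil => simp
  | cons y ys ih => simp [List.foldl, ih y, ih (x ++ y), String.append_assoc]

theorem join_append (a b : List String) :
    String.join (a ++ b) = String.join a ++ String.join b := by
  induction a with
  | nil => simp
  | cons x xs ih => simp [ih, String.append_assoc]

theorem aLoop_fA (color char : String) (cs : List Char) :
    ∀ (out : List String) (active : Bool),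
    String.join (if (aLoop color char cs (out, active)).2
                 then (aLoop color char cs (out, active)).1 ++ ["[/]"]
                 else (aLoop color char cs (out, active)).1)
      = String.join out ++ fA color char cs active := by
  induction cs with
  | nil =>
    intro out active
    cases active <;> simp [aLoop, fA, join_append]
  | cons p rest ih =>
    intro out active
    by_cases hp : p = '.' <;> cases active <;>
      simp [aLoop, hp, fA, ih, join_append, String.append_assoc]

-- joined B output and its continuation form
def gB (color char : String) (cs : List Char) : String := String.join (bLoop color char cs)

def hB (color : String) (char : String) : List Char → String
  | [] => "[/]"
  | c :: cs => if c = '.' then "[/]" ++ gB color char (c :: cs) else char ++ hB color char cs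

@[simp] theorem join_replicate_succ (n : Nat) (s : String) :
    String.join (List.replicate (n + 1) s) = s ++ String.join (List.replicate n s) := by
  simp [List.replicate_succ]

theorem gB_dot (color char : String) (cs : List Char) :
    gB color char ('.' :: cs) = " " ++ gB color char cs := by
  cases cs with
  | nil => simp [gB, bLoop, bTake, joinRep]
  | cons c cs' =>
    by_cases hc : c = '.' <;>
      simp [gB, bLoop, bTake, hc, joinRep, String.append_assoc]

theorem hB_bTake (color char : String) (cs : List Char) :
    joinRep (bTake false cs).1 char ++ "[/]" ++ gB color char (bTake false cs).2
      = hB color char cs := by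
  induction cs with
  | nil => simp [bTake, joinRep, hB, gB, bLoop]
  | cons c cs' ih =>
    by_cases hc : c = '.'
    · simp [bTake, hc, joinRep, hB, gB]
    · simp [bTake, hc, hB, joinRep, String.append_assoc, ← ih]

theorem gB_nondot (color char : String) (c : Char) (cs : List Char) (hc : ¬ c = '.') :
    gB color char (c :: cs) = "[" ++ color ++ "]" ++ char ++ hB color char cs := by
  have e : bLoop color char (c :: cs)
      = ("[" ++ color ++ "]" ++ joinRep ((bTake false cs).1 + 1) char ++ "[/]")
        :: bLoop color char (bTake false cs).2 := by
    simp [bLoop, hc]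
  rw [gB, e, join_cons, ← hB_bTake color char cs]
  simp [gB, joinRep, String.append_assoc]

theorem fA_gB (color char : String) (cs : List Char) :
    fA color char cs false = gB color char cs ∧ fA color char cs true = hB color char cs := by
  induction cs with
  | nil => simp [fA, gB, bLoop, hB]
  | cons c cs' ih =>
    by_cases hc : c = '.'
    · subst hc
      refine ⟨by simp [fA, ih.1, gB_dot], ?_⟩
      simp [fA, hB, ih.1, gB_dot]
      rw [← String.append_assoc]
      rfl
    · refine ⟨?_, by simp [fA, hB, hc, ih.2]⟩
      simp [fA, hc, ih.2, gB_nondot color char c cs' hc, String.append_assoc]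

-- ===== VERDICT (by name: the statement is the Claim_ definition above) =====
theorem render_mask_row_py_spec : Claim_equal_render_mask_row_py := by
  intro row color char _
  show render_mask_row_py row color char = render_mask_row_py_alt row color char
  have h := aLoop_fA color char row.toList [] false
  simpa [render_mask_row_py, render_mask_row_py_alt, (fA_gB color char row.toList).1, gB] using h
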